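-- pv_equiv track=rewrite | github.com/giannispaneth/Tic-Tac-Chec | minimaxfunctions.py | not_in_board_moves
-- ===== SOURCE A (Python) =====
-- def not_in_board_moves(kind, color, grid):
--     k = 0
--
--     for i in range(0, 4, 1):
--         for j in range(0, 4, 1):
--             if grid[i][j] == (kind, color):
--                 k = 1
--     if k == 0:
--         moves = []
--
--         for i in range(0, 4, 1):
--             for j in range(0, 4, 1):
--                 if grid[i][j] == ('_', '_'):
--                     moves.append([i, j])
--         return moves
--     else:
--         moves = []
--         return moves
-- ===== SOURCE B (Python) =====
-- def not_in_board_moves(kind, color, grid):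
--     # Single fused pass: collect empty cells and detect the piece at once.
--     found = False
--     moves = []
--     for i in range(4):
--         for j in range(4):
--             cell = grid[i][j]
--             if cell == (kind, color):
--                 found = True
--             elif cell == ('_', '_'):
--                 moves.append([i, j])
--     return [] if found else moves
-- ===== Notes on version B (the rewrite author's own statement) =====
-- stated objective: simpler
-- what changed: B fuses A's two full board scans (presence check, then empty-cell collection) into one nested pass that simultaneously records empty cells and a found flag, returning [] if the piece was seen.
import Mathlib
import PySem

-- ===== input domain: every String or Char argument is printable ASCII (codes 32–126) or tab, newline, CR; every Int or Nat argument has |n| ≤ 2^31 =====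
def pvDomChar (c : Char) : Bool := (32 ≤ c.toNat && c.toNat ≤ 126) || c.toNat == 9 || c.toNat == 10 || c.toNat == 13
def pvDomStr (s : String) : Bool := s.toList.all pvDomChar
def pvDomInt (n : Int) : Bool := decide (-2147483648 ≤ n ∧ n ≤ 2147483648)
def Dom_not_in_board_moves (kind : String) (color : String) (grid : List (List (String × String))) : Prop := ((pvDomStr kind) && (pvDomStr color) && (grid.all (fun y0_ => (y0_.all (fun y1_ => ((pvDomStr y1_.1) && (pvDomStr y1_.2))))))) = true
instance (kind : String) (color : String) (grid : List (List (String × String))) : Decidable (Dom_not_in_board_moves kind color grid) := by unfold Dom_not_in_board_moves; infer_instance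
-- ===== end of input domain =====

-- B fuses A's two full board scans into one pass that records empty cells and a found flag together (objective: simpler).

-- ===== PORT A =====
-- grid[i][j] is ported with pyGetD; Pre_ guarantees the indices are in range, where Python returns (outside, Python raises IndexError).
def not_in_board_moves (kind : String) (color : String) (grid : List (List (String × String))) : List (List Int) :=
  let k : Int := (PySem.List.pyRange 0 4 1).foldl (fun k i =>
      (PySem.List.pyRange 0 4 1).foldl (fun k j =>
        if PySem.List.pyGetD (PySem.List.pyGetD grid i []) j ("?", "?") = (kind, color) then (1 : Int) else k) k) 0
  if k = 0 then
    (PySem.List.pyRange 0 4 1).foldl (fun moves i =>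
      (PySem.List.pyRange 0 4 1).foldl (fun moves j =>
        if PySem.List.pyGetD (PySem.List.pyGetD grid i []) j ("?", "?") = ("_", "_") then moves ++ [[i, j]] else moves) moves)
      ([] : List (List Int))
  else ([] : List (List Int))

-- ===== PORT B =====
def not_in_board_moves_alt (kind : String) (color : String) (grid : List (List (String × String))) : List (List Int) :=
  let st : Bool × List (List Int) := (PySem.List.pyRange 0 4 1).foldl (fun st i =>
      (PySem.List.pyRange 0 4 1).foldl (fun st j =>
        let cell := PySem.List.pyGetD (PySem.List.pyGetD grid i []) j ("?", "?")
        if cell = (kind, color) then (true, st.2)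
        else if cell = ("_", "_") then (st.1, st.2 ++ [[i, j]])
        else st) st) (false, [])
  if st.1 then [] else st.2

-- ===== PRECONDITION & SPEC =====
-- Pre_: the board has at least 4 rows of at least 4 cells each — exactly where Python A's grid[i][j] (i,j < 4) does not raise IndexError.
def Pre_not_in_board_moves (_kind : String) (_color : String) (grid : List (List (String × String))) : Prop :=
  4 ≤ grid.length ∧ ∀ row ∈ grid.take 4, 4 ≤ row.length
instance (kind : String) (color : String) (grid : List (List (String × String))) : Decidable (Pre_not_in_board_moves kind color grid) := by unfold Pre_not_in_board_moves; infer_instance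
def pvWitness_not_in_board_moves : String × String × (List (List (String × String))) :=
  ("p", "w", [[("_", "_"), ("_", "_"), ("_", "_"), ("_", "_")],
              [("_", "_"), ("p", "b"), ("_", "_"), ("_", "_")],
              [("_", "_"), ("_", "_"), ("_", "_"), ("_", "_")],
              [("_", "_"), ("_", "_"), ("_", "_"), ("_", "_")]])
def Spec_not_in_board_moves (kind : String) (color : String) (grid : List (List (String × String))) (out : List (List Int)) : Prop := out = not_in_board_moves_alt kind color grid
instance (kind : String) (color : String) (grid : List (List (String × String))) (out : List (List Int)) : Decidable (Spec_not_in_board_moves kind color grid out) := by unfold Spec_not_in_board_moves; infer_instance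

-- ===== CLAIM (what is proved, stated in full; the proofs are below) =====
def Claim_equal_not_in_board_moves : Prop := ∀ (kind : String) (color : String) (grid : List (List (String × String))), Dom_not_in_board_moves kind color grid → Pre_not_in_board_moves kind color grid → Spec_not_in_board_moves kind color grid (not_in_board_moves kind color grid)

-- ===== LEMMAS AND PROOFS =====

-- the 16 board coordinates in the row-major order both nested loops visit
def pvL16 : List (Int × Int) :=
  [(0,0),(0,1),(0,2),(0,3),(1,0),(1,1),(1,2),(1,3),(2,0),(2,1),(2,2),(2,3),(3,0),(3,1),(3,2),(3,3)]

theorem pvRange4 : PySem.List.pyRange 0 4 1 = [0, 1, 2, 3] := by decide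

-- a nested fold over the two literal ranges is the flat fold over the 16 pairs
theorem pv_nested_flat {β : Type} (f : β → Int → Int → β) (b : β) :
    List.foldl (fun b i => List.foldl (fun b j => f b i j) b ([0,1,2,3] : List Int)) b ([0,1,2,3] : List Int)
      = List.foldl (fun b p => f b p.1 p.2) b pvL16 := rfl

theorem pv_kfold (c : Int × Int → String × String) (kc : String × String)
    (L : List (Int × Int)) (k : Int) :
    L.foldl (fun k p => if c p = kc then (1 : Int) else k) k
      = if L.any (fun p => c p = kc) then 1 else k := by
  induction L generalizing k with
  | nil => simp
  | cons p t ih =>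
    by_cases h : c p = kc
    · simp [h, ih]
    · simp only [List.foldl_cons, List.any_cons, if_neg h, ih, decide_eq_false h, Bool.false_or]

theorem pv_mfold (c : Int × Int → String × String)
    (L : List (Int × Int)) (m : List (List Int)) :
    L.foldl (fun m p => if c p = ("_", "_") then m ++ [[p.1, p.2]] else m) m
      = m ++ (L.filter (fun p => c p = ("_", "_"))).map (fun p => [p.1, p.2]) := by
  induction L generalizing m with
  | nil => simp
  | cons p t ih => by_cases h : c p = ("_", "_") <;> simp [h, ih]

theorem pv_bfold (c : Int × Int → String × String) (kc : String × String)
    (L : List (Int × Int)) (f : Bool) (m : List (List Int)) :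
    L.foldl (fun st p =>
        if c p = kc then (true, st.2)
        else if c p = ("_", "_") then (st.1, st.2 ++ [[p.1, p.2]])
        else st) ((f, m) : Bool × List (List Int))
      = (f || L.any (fun p => c p = kc),
         m ++ (L.filter (fun p => ¬ c p = kc ∧ c p = ("_", "_"))).map (fun p => [p.1, p.2])) := by
  induction L generalizing f m with
  | nil => simp
  | cons p t ih =>
    by_cases h : c p = kc
    · simp [h, ih]
    · by_cases h2 : c p = ("_", "_")
      · have h3 : ¬ (("_", "_") : String × String) = kc := by rw [← h2]; exact h
        simp [h2, h3, ih]
      · simp [h, h2, decide_eq_false, ih]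

-- ===== VERDICT (by name: the statement is the Claim_ definition above) =====
theorem not_in_board_moves_spec : Claim_equal_not_in_board_moves := by
  intro kind color grid _hd _hp
  unfold Spec_not_in_board_moves not_in_board_moves not_in_board_moves_alt
  rw [pvRange4]
  rw [pv_nested_flat (fun k i j =>
        if PySem.List.pyGetD (PySem.List.pyGetD grid i []) j ("?", "?") = (kind, color) then (1 : Int) else k),
      pv_nested_flat (fun moves i j =>
        if PySem.List.pyGetD (PySem.List.pyGetD grid i []) j ("?", "?") = ("_", "_") then moves ++ [[i, j]] else moves),
      pv_nested_flat (fun (st : Bool × List (List Int)) i j =>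
        let cell := PySem.List.pyGetD (PySem.List.pyGetD grid i []) j ("?", "?")
        if cell = (kind, color) then (true, st.2)
        else if cell = ("_", "_") then (st.1, st.2 ++ [[i, j]])
        else st)]
  set c : Int × Int → String × String :=
    fun p => PySem.List.pyGetD (PySem.List.pyGetD grid p.1 []) p.2 ("?", "?") with hc
  rw [pv_kfold c (kind, color) pvL16 0,
      pv_bfold c (kind, color) pvL16 false []]
  by_cases hany : pvL16.any (fun p => c p = (kind, color))
  · simp [hany]
  · rw [pv_mfold c pvL16 []]
    rw [Bool.not_eq_true] at hany
    have hall : ∀ p ∈ pvL16, ¬ c p = (kind, color) := by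
      rw [List.any_eq_false] at hany; simpa using hany
    simp only [hany, Bool.false_or, List.nil_append]
    norm_num
    congr 1
    apply List.filter_congr
    intro p hp
    simp [hall p hp]
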